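-- pv_equiv track=rewrite | github.com/Lucho47S/TPFinal_Div317_Santa_Cruz_Luciano | modules/gameplay.py | filter_cards_by_series
-- ===== SOURCE A (Python) =====
-- def filter_cards_by_series(cards: list) -> dict:
--     """Organiza las cartas por serie.
--
--     Args:
--         cards (list): Lista de cartas.
--
--     Returns:
--         dict: Diccionario con series como keys y listas de cartas como valores.
--     """
--     series_dict = {}
--
--     for c in cards:
--         serie = c["serie"]
--         if serie not in series_dict:
--             series_dict[serie] = []
--         series_dict[serie].append(c)
--
--     return series_dict
-- ===== SOURCE B (Python) =====
-- def filter_cards_by_series(cards: list) -> dict: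
--     """Organiza las cartas por serie (index-then-filter decomposition)."""
--     order = []
--     for c in cards:
--         s = c["serie"]
--         if s not in order:
--             order.append(s)
--     return {s: [c for c in cards if c["serie"] == s] for s in order}
-- ===== Notes on version B (the rewrite author's own statement) =====
-- stated objective: alternative
-- what changed: Replaced the single-pass dict-of-lists accumulation with a two-phase index-then-filter scheme: one pass collects the distinct series keys in first-appearance order, then each group is built by a separate filtering scan of the card list.
import Mathlib
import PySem

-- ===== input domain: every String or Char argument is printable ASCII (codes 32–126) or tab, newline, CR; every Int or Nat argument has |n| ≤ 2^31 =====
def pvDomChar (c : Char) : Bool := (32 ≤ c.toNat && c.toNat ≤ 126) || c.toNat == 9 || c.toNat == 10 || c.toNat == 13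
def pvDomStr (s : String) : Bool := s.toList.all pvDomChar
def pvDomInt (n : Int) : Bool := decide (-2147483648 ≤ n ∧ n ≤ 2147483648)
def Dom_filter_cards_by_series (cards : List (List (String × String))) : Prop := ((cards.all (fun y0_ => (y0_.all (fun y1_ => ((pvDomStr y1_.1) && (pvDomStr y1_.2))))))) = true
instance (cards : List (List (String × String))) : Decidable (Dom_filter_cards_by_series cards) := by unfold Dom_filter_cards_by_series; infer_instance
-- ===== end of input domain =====

-- B is an alternative decomposition (index the distinct series, then filter per series); same return value.
-- ===== PORT A =====
-- c["serie"]: exact under Pre_ (the key is present); Python raises KeyError otherwise (excluded by Pre_).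
def pvKey (c : List (String × String)) : String := ((PySem.Dict.mk c).get? "serie").getD ""

def filter_cards_by_series (cards : List (List (String × String))) : List (String × List (List (String × String))) :=
  (cards.foldl (fun d c =>
      let s := pvKey c
      let d1 := if d.contains s then d else d.insert s []
      d1.modify s [] (fun v => v ++ [c]))
    PySem.Dict.empty).items

-- ===== PORT B =====
def filter_cards_by_series_alt (cards : List (List (String × String))) : List (String × List (List (String × String))) :=
  let order : PySem.Set String := cards.foldl (fun ks c => PySem.Set.add ks (pvKey c)) PySem.Set.empty
  order.map (fun s => (s, cards.filter (fun c => pvKey c == s)))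

-- ===== PRECONDITION & SPEC =====
-- Pre_ excludes cards without a "serie" key, on which Python A raises KeyError.
def Pre_filter_cards_by_series (cards : List (List (String × String))) : Prop :=
  (cards.all (fun c => (PySem.Dict.mk c).contains "serie")) = true
instance (cards : List (List (String × String))) : Decidable (Pre_filter_cards_by_series cards) := by unfold Pre_filter_cards_by_series; infer_instance
def pvWitness_filter_cards_by_series : (List (List (String × String))) :=
  [[("serie", "A"), ("nombre", "x")], [("serie", "B"), ("nombre", "y")], [("serie", "A"), ("nombre", "z")]]

def Spec_filter_cards_by_series (cards : List (List (String × String))) (out : List (String × List (List (String × String)))) : Prop := out = filter_cards_by_series_alt cards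
instance (cards : List (List (String × String))) (out : List (String × List (List (String × String)))) : Decidable (Spec_filter_cards_by_series cards out) := by unfold Spec_filter_cards_by_series; infer_instance

-- ===== CLAIM (what is proved, stated in full; the proofs are below) =====
def Claim_equal_filter_cards_by_series : Prop := ∀ (cards : List (List (String × String))), Dom_filter_cards_by_series cards → Pre_filter_cards_by_series cards → Spec_filter_cards_by_series cards (filter_cards_by_series cards)

-- ===== LEMMAS AND PROOFS =====

-- A's loop body equals one unconditional 'modify append'.
theorem pv_stepA_eq (d : PySem.Dict String (List (List (String × String)))) (c : List (String × String)) :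
    (let s := pvKey c
     let d1 := if d.contains s then d else d.insert s []
     d1.modify s [] (fun v => v ++ [c]))
    = d.modify (pvKey c) [] (fun v => v ++ [c]) := by
  by_cases h : d.contains (pvKey c)
  · simp [h]
  · have h0 : d.getD (pvKey c) [] = [] :=
      PySem.Dict.getD_of_not_contains d [] (by simpa using h)
    simp only [h]
    simp [PySem.Dict.modify, PySem.Dict.insert_insert_self, PySem.Dict.getD_insert_self, h0]

-- A's fold characterised: keys in first-appearance order, each key's value = the filtered cards.
theorem pv_A_items (cards : List (List (String × String))) :
    filter_cards_by_series cards
    = (PySem.Set.ofList (cards.map pvKey)).map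
        (fun s => (s, cards.filter (fun c => pvKey c == s))) := by
  have hstep : (fun (d : PySem.Dict String (List (List (String × String)))) c =>
      let s := pvKey c
      let d1 := if d.contains s then d else d.insert s []
      d1.modify s [] (fun v => v ++ [c]))
      = (fun d c => d.modify (pvKey c) [] (fun v => v ++ [c])) :=
    funext fun d => funext fun c => pv_stepA_eq d c
  unfold filter_cards_by_series
  rw [hstep]
  have hfold : cards.foldl (fun d c => d.modify (pvKey c) [] (fun v => v ++ [c])) PySem.Dict.empty
      = (cards.map (fun c => (pvKey c, c))).foldl
          (fun d p => d.modify p.1 [] (fun v => v ++ [p.2])) PySem.Dict.empty := by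
    rw [List.foldl_map]
  have hkeys : (cards.foldl (fun d c => d.modify (pvKey c) [] (fun v => v ++ [c])) PySem.Dict.empty).keys
      = PySem.Set.ofList (cards.map pvKey) := by
    rw [PySem.Dict.keys_foldl_modify_key (key := pvKey) (f := fun _ c => fun v => v ++ [c])]
    simp only [PySem.Dict.keys_empty, PySem.Set.update_nil_left]
  have hnd : (cards.foldl (fun d c => d.modify (pvKey c) [] (fun v => v ++ [c])) PySem.Dict.empty).keys.Nodup := by
    rw [hkeys]; exact PySem.Set.nodup_ofList _
  have hgetD : ∀ s, (cards.foldl (fun d c => d.modify (pvKey c) [] (fun v => v ++ [c])) PySem.Dict.empty).getD s []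
      = cards.filter (fun c => pvKey c == s) := by
    intro s
    rw [hfold, PySem.Dict.getD_foldl_modify_append]
    simp [PySem.Dict.getD_empty, List.filter_map, List.map_map, Function.comp_def]
  rw [PySem.Dict.items_eq_map_keys _ hnd [], hkeys]
  exact List.map_congr_left (fun s _ => by rw [hgetD s])

theorem pv_B_eq (cards : List (List (String × String))) :
    filter_cards_by_series_alt cards
    = (PySem.Set.ofList (cards.map pvKey)).map
        (fun s => (s, cards.filter (fun c => pvKey c == s))) := by
  unfold filter_cards_by_series_alt
  rw [← PySem.Set.update_map_eq_foldl_add, PySem.Set.update_empty]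

-- ===== VERDICT (by name: the statement is the Claim_ definition above) =====
theorem filter_cards_by_series_spec : Claim_equal_filter_cards_by_series := by
  intro cards _ _
  unfold Spec_filter_cards_by_series
  rw [pv_A_items, pv_B_eq]
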